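-- pv_equiv track=rewrite | github.com/retospect/tome-mcp | src/tome/cite_tree.py | _is_descendant_of
-- ===== SOURCE A (Python) =====
-- from typing import Any
--
-- def _is_descendant_of(
--     explorations: dict[str, Any],
--     s2_id: str,
--     ancestor_s2_id: str,
--     _visited: set[str] | None = None,
-- ) -> bool:
--     """Check if s2_id is a descendant of ancestor_s2_id via parent chain."""
--     if s2_id == ancestor_s2_id:
--         return True
--     if _visited is None:
--         _visited = set()
--     if s2_id in _visited:
--         return False  # cycle protection
--     _visited.add(s2_id)
--     entry = explorations.get(s2_id)
--     if not entry:
--         return False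
--     parent = entry.get("parent_s2_id", "")
--     if not parent:
--         return False
--     return _is_descendant_of(explorations, parent, ancestor_s2_id, _visited)
-- ===== SOURCE B (Python) =====
-- def _is_descendant_of(
--     explorations,
--     s2_id,
--     ancestor_s2_id,
--     _visited=None,
-- ):
--     """Two staged passes: precompute a flat child->parent map, then walk it
--     materialising the chain and answer by membership of the ancestor.
--
--     Return value matches the original; mutation of a caller-supplied _visited
--     set may add more nodes than the original (which stops early)."""
--     parent_of = {
--         k: e.get("parent_s2_id", "")
--         for k, e in explorations.items()
--         if e and e.get("parent_s2_id", "")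
--     }
--     seen = set() if _visited is None else _visited
--     chain = []
--     cur = s2_id
--     while True:
--         chain.append(cur)
--         if cur in seen:
--             break
--         seen.add(cur)
--         if cur not in parent_of:
--             break
--         cur = parent_of[cur]
--     return ancestor_s2_id in chain
-- ===== Notes on version B (the rewrite author's own statement) =====
-- stated objective: alternative
-- what changed: Replaces the early-exit recursion over nested dict entries with two staged passes: a comprehension flattening explorations into a child->parent map, then an iterative walk of that map materialising the chain and answering by a membership test of the ancestor.
import Mathlib
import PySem

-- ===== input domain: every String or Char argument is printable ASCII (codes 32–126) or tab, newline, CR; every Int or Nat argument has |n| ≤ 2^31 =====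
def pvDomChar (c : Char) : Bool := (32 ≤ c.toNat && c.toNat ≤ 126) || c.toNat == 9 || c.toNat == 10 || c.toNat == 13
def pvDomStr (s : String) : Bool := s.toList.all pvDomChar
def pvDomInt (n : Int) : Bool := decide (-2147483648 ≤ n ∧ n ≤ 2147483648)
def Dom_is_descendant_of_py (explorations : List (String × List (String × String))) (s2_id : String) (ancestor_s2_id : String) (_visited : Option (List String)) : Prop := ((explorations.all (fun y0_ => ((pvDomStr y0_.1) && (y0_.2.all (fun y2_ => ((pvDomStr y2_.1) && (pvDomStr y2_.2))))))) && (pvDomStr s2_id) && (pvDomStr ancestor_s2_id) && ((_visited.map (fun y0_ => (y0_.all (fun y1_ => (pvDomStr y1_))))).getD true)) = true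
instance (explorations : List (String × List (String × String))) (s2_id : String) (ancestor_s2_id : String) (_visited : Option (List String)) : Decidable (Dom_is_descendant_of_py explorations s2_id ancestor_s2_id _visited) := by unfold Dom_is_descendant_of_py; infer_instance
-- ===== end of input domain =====

-- ===== PORT A =====
-- B differs from A in structure: A recurses over the nested entries with early exit; B first
-- flattens explorations into a child->parent map, then walks that map building the chain.
-- Equivalence is about the RETURN value only: A mutates a caller-supplied _visited in place
-- (B's walk may add more nodes to it than A's early-exit recursion).
-- Recursive walk of A, made total with sufficient fuel (explorations.length + 1; each
-- recursive step consumes one key of explorations not yet in visited).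
def pvAWalk (expl : PySem.Dict String (List (String × String))) (anc : String)
    (visited : PySem.Set String) (s2 : String) : Nat → Bool
  | 0 => false
  | fuel+1 =>
    if s2 == anc then true
    else if PySem.Set.contains visited s2 then false
    else
      let visited := PySem.Set.add visited s2
      match expl.get? s2 with
      | none => false
      | some entry =>
        if entry.isEmpty then false
        else
          let parent := (PySem.Dict.ofList entry).getD "parent_s2_id" ""
          if parent == "" then false
          else pvAWalk expl anc visited parent fuel

def is_descendant_of_py (explorations : List (String × List (String × String))) (s2_id : String) (ancestor_s2_id : String) (_visited : Option (List String)) : Bool :=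
  pvAWalk (PySem.Dict.ofList explorations) ancestor_s2_id
    (match _visited with | none => PySem.Set.empty | some l => PySem.Set.ofList l)
    s2_id (explorations.length + 1)

-- ===== PORT B =====
-- Pass 1 of B: the dict comprehension flattening explorations into child -> parent.
def pvParentOf (explorations : List (String × List (String × String))) : PySem.Dict String String :=
  PySem.Dict.mk ((PySem.Dict.ofList explorations).items.filterMap (fun ke =>
    if ke.2.isEmpty then none
    else
      let p := (PySem.Dict.ofList ke.2).getD "parent_s2_id" ""
      if p == "" then none else some (ke.1, p)))

-- Pass 2 of B: the while-loop materialising the walked chain (same fuel device as A).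
def pvBChain (pd : PySem.Dict String String) (seen : PySem.Set String) (cur : String) :
    Nat → List String
  | 0 => []
  | fuel+1 =>
    if PySem.Set.contains seen cur then [cur]
    else
      match pd.get? cur with
      | none => [cur]
      | some p => cur :: pvBChain pd (PySem.Set.add seen cur) p fuel

def is_descendant_of_py_alt (explorations : List (String × List (String × String))) (s2_id : String) (ancestor_s2_id : String) (_visited : Option (List String)) : Bool :=
  (pvBChain (pvParentOf explorations)
    (match _visited with | none => PySem.Set.empty | some l => PySem.Set.ofList l)
    s2_id (explorations.length + 1)).contains ancestor_s2_id

-- ===== PRECONDITION & SPEC =====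
def Spec_is_descendant_of_py (explorations : List (String × List (String × String))) (s2_id : String) (ancestor_s2_id : String) (_visited : Option (List String)) (out : Bool) : Prop := out = is_descendant_of_py_alt explorations s2_id ancestor_s2_id _visited
instance (explorations : List (String × List (String × String))) (s2_id : String) (ancestor_s2_id : String) (_visited : Option (List String)) (out : Bool) : Decidable (Spec_is_descendant_of_py explorations s2_id ancestor_s2_id _visited out) := by unfold Spec_is_descendant_of_py; infer_instance

-- ===== CLAIM (what is proved, stated in full; the proofs are below) =====
def Claim_equal_is_descendant_of_py : Prop := ∀ (explorations : List (String × List (String × String))) (s2_id : String) (ancestor_s2_id : String) (_visited : Option (List String)), Dom_is_descendant_of_py explorations s2_id ancestor_s2_id _visited → Spec_is_descendant_of_py explorations s2_id ancestor_s2_id _visited (is_descendant_of_py explorations s2_id ancestor_s2_id _visited)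

-- ===== LEMMAS AND PROOFS =====

-- Proof-side view of one flattening step: what B's comprehension keeps of an entry,
-- and exactly the conditions of A's terminal cascade.
def pvStep (e : List (String × String)) : Option String :=
  if e.isEmpty then none
  else
    let p := (PySem.Dict.ofList e).getD "parent_s2_id" ""
    if p == "" then none else some p

theorem pvStep_spec (ke : String × List (String × String)) :
    (if ke.2.isEmpty then none
     else
       let p := (PySem.Dict.ofList ke.2).getD "parent_s2_id" ""
       if p == "" then none else some (ke.1, p))
    = (pvStep ke.2).map (fun p => (ke.1, p)) := by
  simp only [pvStep]
  split
  · rfl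
  · split <;> rfl

-- Looking up in the comprehension-built dict = looking up the entry, then one step,
-- provided the source keys are distinct (they are: items of a Dict).
theorem pvLookup_filterMap (x : String) :
    ∀ (items : List (String × List (String × String))),
      (items.map Prod.fst).Nodup →
      (PySem.Dict.mk (items.filterMap (fun ke => (pvStep ke.2).map (fun p => (ke.1, p))))).get? x
        = ((PySem.Dict.mk items).get? x).bind pvStep := by
  intro items
  induction items with
  | nil => intro _; simp [PySem.Dict.get?]
  | cons ke rest ih =>
    intro hnd
    simp only [List.map_cons, List.nodup_cons] at hnd
    obtain ⟨hx, hnd⟩ := hnd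
    simp only [List.filterMap_cons]
    cases hstep : pvStep ke.2 with
    | some p =>
      simp only [Option.map_some]
      rw [PySem.Dict.get?_mk_cons, PySem.Dict.get?_mk_cons]
      by_cases hk : ke.1 == x
      · simp [hk, hstep]
      · simp only [hk] at *
        simp [ih hnd]
    | none =>
      simp only [Option.map_none]
      rw [PySem.Dict.get?_mk_cons]
      by_cases hk : ke.1 == x
      · -- x = ke.1 does not occur in rest, hence not in the filterMapped rest either
        have hxk : ke.1 = x := by exact eq_of_beq hk
        subst hxk
        have hnm : ke.1 ∉ (rest.filterMap
            (fun ke => (pvStep ke.2).map (fun p => (ke.1, p)))).map Prod.fst := by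
          intro hmem
          apply hx
          simp only [List.mem_map] at hmem ⊢
          obtain ⟨pr, hpr, hfst⟩ := hmem
          simp only [List.mem_filterMap] at hpr
          obtain ⟨ke', hke', hmap⟩ := hpr
          refine ⟨ke', hke', ?_⟩
          cases h' : pvStep ke'.2 with
          | none => rw [h'] at hmap; simp at hmap
          | some q => rw [h'] at hmap; simp at hmap; rw [← hmap] at hfst; exact hfst
        have := (PySem.Dict.get?_eq_none_iff_not_mem_keys
          (PySem.Dict.mk (rest.filterMap (fun ke => (pvStep ke.2).map (fun p => (ke.1, p))))) ke.1).mpr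
          (by simpa [PySem.Dict.keys_mk] using hnm)
        simp [this, hstep]
      · simp only [hk] at *
        simp [ih hnd]

-- Every chain B builds starts with the node it was started from.
theorem pvBChain_self_mem (pd : PySem.Dict String String) (seen : PySem.Set String)
    (cur : String) (f : Nat) : cur ∈ pvBChain pd seen cur (f+1) := by
  simp only [pvBChain]
  split
  · simp
  · split <;> simp

-- A's recursive walk answers exactly: is the ancestor a member of B's chain (same fuel),
-- whenever the walked dict looks up as entry-then-step.
theorem pvAWalk_eq_chain (expl : PySem.Dict String (List (String × String)))
    (pd : PySem.Dict String String) (anc : String)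
    (hpd : ∀ c, pd.get? c = (expl.get? c).bind pvStep) :
    ∀ (fuel : Nat) (seen : PySem.Set String) (cur : String),
      pvAWalk expl anc seen cur fuel = (pvBChain pd seen cur fuel).contains anc := by
  intro fuel
  induction fuel with
  | zero => intro seen cur; simp [pvAWalk, pvBChain]
  | succ f ih =>
    intro seen cur
    by_cases h1 : cur = anc
    · subst h1
      have hmem := pvBChain_self_mem pd seen cur f
      simp [pvAWalk, hmem]
    · have hne : ¬ anc = cur := fun h => h1 h.symm
      simp only [pvAWalk, pvBChain]
      rw [if_neg (by simp [h1])]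
      split
      · simp [hne]
      · rw [hpd]
        cases hd : expl.get? cur with
        | none => simp [hne]
        | some entry =>
          simp only [Option.bind_some, pvStep]
          split
          · simp [hne]
          · split
            · simp [hne]
            · simp [hne, ih]

-- ===== VERDICT (by name: the statement is the Claim_ definition above) =====
theorem is_descendant_of_py_spec : Claim_equal_is_descendant_of_py := by
  intro explorations s2_id ancestor_s2_id _visited _
  unfold Spec_is_descendant_of_py is_descendant_of_py is_descendant_of_py_alt
  apply pvAWalk_eq_chain
  intro c
  have h := pvLookup_filterMap c (PySem.Dict.ofList explorations).items
    (by simpa [PySem.Dict.keys] using PySem.Dict.nodup_keys_ofList explorations)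
  simp only [pvParentOf]
  have hbody : ((PySem.Dict.ofList explorations).items.filterMap (fun ke =>
      if ke.2.isEmpty then none
      else
        let p := (PySem.Dict.ofList ke.2).getD "parent_s2_id" ""
        if p == "" then none else some (ke.1, p)))
      = ((PySem.Dict.ofList explorations).items.filterMap (fun ke =>
        (pvStep ke.2).map (fun p => (ke.1, p)))) := by
    apply List.filterMap_congr
    intro ke _
    exact pvStep_spec ke
  rw [hbody, h]
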